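-- pv_equiv track=rewrite | github.com/quangtrinh25/AIO2025 | model/behrt_model.py | index_seg
-- ===== SOURCE A (Python) =====
-- SEP = 2
--
-- def index_seg(tokens, symbol=SEP):
--     flag = 0
--     seg = []
--
--     for token in tokens:
--         if token == symbol:
--             seg.append(flag)
--             if flag == 0:
--                 flag = 1
--             else:
--                 flag = 0
--         else:
--             seg.append(flag)
--     return seg
-- ===== SOURCE B (Python) =====
-- SEP = 2
--
-- def index_seg(tokens, symbol=SEP):
--     # two-pass: separator indicator table, exclusive prefix count, then parity
--     seps = [1 if t == symbol else 0 for t in tokens]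
--     prefix = []
--     total = 0
--     for s in seps:
--         prefix.append(total)
--         total += s
--     return [p % 2 for p in prefix]
-- ===== Notes on version B (the rewrite author's own statement) =====
-- stated objective: alternative
-- what changed: Replaces the stateful toggle loop by a two-pass table construction: a separator indicator list, an exclusive prefix count, and a parity map.
import Mathlib
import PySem

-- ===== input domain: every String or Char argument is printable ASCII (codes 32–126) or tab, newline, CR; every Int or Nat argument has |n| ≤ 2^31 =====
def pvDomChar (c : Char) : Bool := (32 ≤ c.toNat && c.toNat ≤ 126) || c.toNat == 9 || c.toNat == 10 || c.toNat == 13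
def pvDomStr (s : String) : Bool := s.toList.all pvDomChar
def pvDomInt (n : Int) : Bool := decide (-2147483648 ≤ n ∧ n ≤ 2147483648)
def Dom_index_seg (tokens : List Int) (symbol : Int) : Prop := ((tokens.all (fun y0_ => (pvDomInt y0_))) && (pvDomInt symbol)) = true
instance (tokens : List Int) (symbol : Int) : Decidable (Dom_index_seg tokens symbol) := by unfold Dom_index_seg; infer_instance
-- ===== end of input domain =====

-- B replaces A's stateful toggle loop by a two-pass table construction (indicator list, exclusive prefix count, parity map); alternative decomposition, same cost.


-- ===== PORT A =====
-- A's loop: state (flag, seg); append flag, toggle flag at separators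
def indexSegGoA (symbol : Int) : List Int → Int → List Int → List Int
  | [], _, seg => seg
  | t :: ts, flag, seg =>
    if t = symbol then
      indexSegGoA symbol ts (if flag = 0 then 1 else 0) (seg ++ [flag])
    else
      indexSegGoA symbol ts flag (seg ++ [flag])

def index_seg (tokens : List Int) (symbol : Int) : List Int :=
  indexSegGoA symbol tokens 0 []

-- ===== PORT B =====
-- B's second pass: exclusive prefix sums of the indicator list
def indexSegPrefix : List Int → Int → List Int
  | [], _ => []
  | s :: ss, total => total :: indexSegPrefix ss (total + s)

-- Python's `p % 2` (positive divisor) coincides with Lean's Int.emod `% 2` for every p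
def index_seg_alt (tokens : List Int) (symbol : Int) : List Int :=
  let seps := tokens.map (fun t => if t = symbol then (1 : Int) else 0)
  (indexSegPrefix seps 0).map (fun p => p % 2)

-- ===== PRECONDITION & SPEC =====
def Spec_index_seg (tokens : List Int) (symbol : Int) (out : List Int) : Prop := out = index_seg_alt tokens symbol
instance (tokens : List Int) (symbol : Int) (out : List Int) : Decidable (Spec_index_seg tokens symbol out) := by unfold Spec_index_seg; infer_instance

-- ===== CLAIM (what is proved, stated in full; the proofs are below) =====
def Claim_equal_index_seg : Prop := ∀ (tokens : List Int) (symbol : Int), Dom_index_seg tokens symbol → Spec_index_seg tokens symbol (index_seg tokens symbol)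

-- ===== LEMMAS AND PROOFS =====
theorem indexSegGoA_eq (symbol : Int) (ts : List Int) :
    ∀ (total : Int) (seg : List Int), 0 ≤ total →
      indexSegGoA symbol ts (total % 2) seg
        = seg ++ (indexSegPrefix (ts.map (fun t => if t = symbol then (1 : Int) else 0)) total).map (fun p => p % 2) := by
  induction ts with
  | nil => intro total seg _; simp [indexSegGoA, indexSegPrefix]
  | cons t ts ih =>
    intro total seg htot
    by_cases h : t = symbol
    · have h1 : (if (total % 2) = 0 then (1 : Int) else 0) = (total + 1) % 2 := by omega
      simp only [indexSegGoA, indexSegPrefix, List.map_cons, if_pos h, h1]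
      rw [ih (total + 1) (seg ++ [total % 2]) (by omega)]
      simp
    · simp only [indexSegGoA, indexSegPrefix, List.map_cons, if_neg h, add_zero]
      rw [ih total (seg ++ [total % 2]) htot]
      simp

-- ===== VERDICT (by name: the statement is the Claim_ definition above) =====
theorem index_seg_spec : Claim_equal_index_seg := by
  intro tokens symbol _
  unfold Spec_index_seg index_seg index_seg_alt
  have := indexSegGoA_eq symbol tokens 0 [] le_rfl
  simpa using this
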